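-- pv_equiv track=rewrite | github.com/bond005/bert_ner | bert_ner/bert_ner.py | tokenize_by_character_groups
-- ===== SOURCE A (Python) =====
-- from typing import Dict, Union, List, Tuple
--
-- def tokenize_by_character_groups(source_text: str) -> List[str]:
--     start_idx = 0
--     tokens = []
--     for char_idx in range(1, len(source_text)):
--         if source_text[char_idx].isalpha():
--             if not source_text[start_idx].isalpha():
--                 new_token = source_text[start_idx:char_idx].strip()
--                 if len(new_token) > 0:
--                     tokens.append(new_token)
--                 start_idx = char_idx
--         elif source_text[char_idx].isdigit():
--             if not source_text[start_idx].isdigit():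
--                 new_token = source_text[start_idx:char_idx].strip()
--                 if len(new_token) > 0:
--                     tokens.append(new_token)
--                 start_idx = char_idx
--         elif source_text[char_idx].isspace():
--             if not source_text[start_idx].isspace():
--                 new_token = source_text[start_idx:char_idx].strip()
--                 if len(new_token) > 0:
--                     tokens.append(new_token)
--                 start_idx = char_idx
--         else:
--             new_token = source_text[start_idx:char_idx].strip()
--             if len(new_token) > 0:
--                 tokens.append(new_token)
--             start_idx = char_idx
--     new_token = source_text[start_idx:].strip()
--     if len(new_token) > 0:
--         tokens.append(new_token)
--     return tokens
-- ===== SOURCE B (Python) =====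
-- from itertools import groupby
-- from typing import List
--
--
-- def _char_class(c: str) -> int:
--     if c.isalpha():
--         return 0
--     if c.isdigit():
--         return 1
--     if c.isspace():
--         return 2
--     return 3
--
--
-- def tokenize_by_character_groups(source_text: str) -> List[str]:
--     tokens = []
--     for key, group in groupby(source_text, key=_char_class):
--         if key == 2:          # whitespace runs produce no token
--             continue
--         chars = list(group)
--         if key == 3:          # each punctuation/other char is its own token
--             tokens.extend(chars)
--         else:                 # letter or digit runs form one token
--             tokens.append(''.join(chars))
--     return tokens
-- ===== Notes on version B (the rewrite author's own statement) =====
-- stated objective: simpler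
-- what changed: Replaces A's index-tracking loop with per-iteration start-character re-classification, slicing and stripping by a single itertools.groupby over character classes: letter/digit runs become one token each, whitespace runs are skipped, and each punctuation character becomes its own single-character token.
import Mathlib
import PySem

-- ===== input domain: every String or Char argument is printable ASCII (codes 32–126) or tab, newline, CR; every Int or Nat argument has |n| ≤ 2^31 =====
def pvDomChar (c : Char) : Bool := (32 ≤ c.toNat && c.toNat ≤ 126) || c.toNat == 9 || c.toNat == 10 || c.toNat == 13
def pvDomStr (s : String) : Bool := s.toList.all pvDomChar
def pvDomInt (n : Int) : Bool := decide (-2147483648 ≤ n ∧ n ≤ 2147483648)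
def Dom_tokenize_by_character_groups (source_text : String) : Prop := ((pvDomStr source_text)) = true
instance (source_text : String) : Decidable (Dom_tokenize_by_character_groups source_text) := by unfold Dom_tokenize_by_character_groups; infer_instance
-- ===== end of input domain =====

-- ===== PORT A =====
-- B replaces A's index/slice/strip loop by a groupby over character classes (simpler decomposition, same O(n)).
-- A-side helpers: the loop body and the final emit of A, transliterated.
def pvAStep (s : List Char) (acc : Int × List (List Char)) (i : Int) : Int × List (List Char) :=
  let ci := PySem.List.pyGetD s i ' '
  let cs := PySem.List.pyGetD s acc.1 ' '
  let emit : Int × List (List Char) :=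
    let tok := PySem.Chars.strip (PySem.List.slice s (some acc.1) (some i))
    (i, if 0 < tok.length then acc.2 ++ [tok] else acc.2)
  if PySem.Chars.isalpha ci then
    if !PySem.Chars.isalpha cs then emit else acc
  else if PySem.Chars.isdigit ci then
    if !PySem.Chars.isdigit cs then emit else acc
  else if PySem.Chars.isspace ci then
    if !PySem.Chars.isspace cs then emit else acc
  else emit

def pvAFinish (s : List Char) (r : Int × List (List Char)) : List (List Char) :=
  let tok := PySem.Chars.strip (PySem.List.slice s (some r.1) none)
  if 0 < tok.length then r.2 ++ [tok] else r.2

def tokenize_by_character_groups (source_text : String) : List String :=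
  let s := source_text.toList
  let r := (PySem.List.pyRange 1 (PySem.List.len s) 1).foldl (pvAStep s) (0, [])
  (pvAFinish s r).map String.ofList

-- ===== PORT B =====
def pvCharClass (c : Char) : Nat :=
  if PySem.Chars.isalpha c then 0
  else if PySem.Chars.isdigit c then 1
  else if PySem.Chars.isspace c then 2
  else 3

-- itertools.groupby over the characters, keyed by pvCharClass (maximal runs of equal class)
def pvGroupBy : List Char → List (List Char)
  | [] => []
  | c :: rest =>
    (c :: rest.takeWhile (fun d => pvCharClass d == pvCharClass c)) ::
      pvGroupBy (rest.dropWhile (fun d => pvCharClass d == pvCharClass c))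
termination_by l => l.length
decreasing_by simp; exact List.length_dropWhile_le ..

-- Source B's loop body over one (key, group) pair
def pvBStep (toks : List (List Char)) (g : List Char) : List (List Char) :=
  match g with
  | [] => toks
  | c :: _ =>
    if pvCharClass c == 2 then toks
    else if pvCharClass c == 3 then toks ++ g.map (fun ch => [ch])
    else toks ++ [g]

def tokenize_by_character_groups_alt (source_text : String) : List String :=
  ((pvGroupBy source_text.toList).foldl pvBStep []).map String.ofList

-- ===== PRECONDITION & SPEC =====
def Spec_tokenize_by_character_groups (source_text : String) (out : List String) : Prop := out = tokenize_by_character_groups_alt source_text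
instance (source_text : String) (out : List String) : Decidable (Spec_tokenize_by_character_groups source_text out) := by unfold Spec_tokenize_by_character_groups; infer_instance

-- ===== CLAIM (what is proved, stated in full; the proofs are below) =====
def Claim_equal_tokenize_by_character_groups : Prop := ∀ (source_text : String), Dom_tokenize_by_character_groups source_text → Spec_tokenize_by_character_groups source_text (tokenize_by_character_groups source_text)

-- ===== LEMMAS AND PROOFS =====

theorem pvGroupBy_nil : pvGroupBy [] = [] := by simp [pvGroupBy]

theorem pvGroupBy_cons (c : Char) (rest : List Char) :
    pvGroupBy (c :: rest) = (c :: rest.takeWhile (fun d => pvCharClass d == pvCharClass c)) ::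
      pvGroupBy (rest.dropWhile (fun d => pvCharClass d == pvCharClass c)) := by
  simp [pvGroupBy]

-- character-class disjointness (PySem's predicates are explicit code-point ranges)
theorem pv_alpha_not_digit (c : Char) (h : PySem.Chars.isalpha c = true) : PySem.Chars.isdigit c = false := by
  simp [PySem.Chars.isalpha, PySem.Chars.isupper, PySem.Chars.islower, PySem.Chars.isdigit,
    Char.le_def, UInt32.le_iff_toNat_le] at h ⊢
  omega

theorem pv_alpha_not_space (c : Char) (h : PySem.Chars.isalpha c = true) : PySem.Chars.isspace c = false := by
  simp [PySem.Chars.isalpha, PySem.Chars.isupper, PySem.Chars.islower, PySem.Chars.isspace,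
    Char.le_def, UInt32.le_iff_toNat_le] at h ⊢
  omega

theorem pv_digit_not_space (c : Char) (h : PySem.Chars.isdigit c = true) : PySem.Chars.isspace c = false := by
  simp [PySem.Chars.isdigit, PySem.Chars.isspace,
    Char.le_def, UInt32.le_iff_toNat_le] at h ⊢
  omega

-- A's run-continuation test, extracted
def pvSameRun (h c : Char) : Bool :=
  (PySem.Chars.isalpha c && PySem.Chars.isalpha h) ||
  (!PySem.Chars.isalpha c && PySem.Chars.isdigit c && PySem.Chars.isdigit h) ||
  (!PySem.Chars.isalpha c && !PySem.Chars.isdigit c && PySem.Chars.isspace c && PySem.Chars.isspace h)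

def pvEmitTok (run : List Char) (toks : List (List Char)) : List (List Char) :=
  let t := PySem.Chars.strip run
  if 0 < t.length then toks ++ [t] else toks

-- structural form of A's loop: rest to process, current run h :: body, tokens so far
def pvScan : List Char → Char → List Char → List (List Char) → List (List Char)
  | [], h, body, toks => pvEmitTok (h :: body) toks
  | c :: rest, h, body, toks =>
    if pvSameRun h c then pvScan rest h (body ++ [c]) toks
    else pvScan rest c [] (pvEmitTok (h :: body) toks)

-- A's branch tree collapses to a single test against pvSameRun
theorem pv_branch {α : Type} (h c : Char) (acc emit : α) :
    (if PySem.Chars.isalpha c then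
      if !PySem.Chars.isalpha h then emit else acc
    else if PySem.Chars.isdigit c then
      if !PySem.Chars.isdigit h then emit else acc
    else if PySem.Chars.isspace c then
      if !PySem.Chars.isspace h then emit else acc
    else emit) = if pvSameRun h c then acc else emit := by
  by_cases h1 : PySem.Chars.isalpha c <;>
  by_cases h2 : PySem.Chars.isdigit c <;>
  by_cases h3 : PySem.Chars.isspace c <;>
  by_cases h4 : PySem.Chars.isalpha h <;>
  by_cases h5 : PySem.Chars.isdigit h <;>
  by_cases h6 : PySem.Chars.isspace h <;>
  simp [pvSameRun, h1, h2, h3, h4, h5, h6]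

theorem pvSameRun_iff (h c : Char) :
    pvSameRun h c = true ↔ (pvCharClass c = pvCharClass h ∧ pvCharClass c ≠ 3) := by
  unfold pvSameRun pvCharClass
  by_cases h1 : PySem.Chars.isalpha c <;>
  by_cases h2 : PySem.Chars.isdigit c <;>
  by_cases h3 : PySem.Chars.isspace c <;>
  by_cases h4 : PySem.Chars.isalpha h <;>
  by_cases h5 : PySem.Chars.isdigit h <;>
  by_cases h6 : PySem.Chars.isspace h <;>
  first
    | (rw [pv_alpha_not_digit c h1] at h2; exact Bool.noConfusion h2)
    | (rw [pv_alpha_not_space c h1] at h3; exact Bool.noConfusion h3)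
    | (rw [pv_digit_not_space c h2] at h3; exact Bool.noConfusion h3)
    | (rw [pv_alpha_not_digit h h4] at h5; exact Bool.noConfusion h5)
    | (rw [pv_alpha_not_space h h4] at h6; exact Bool.noConfusion h6)
    | (rw [pv_digit_not_space h h5] at h6; exact Bool.noConfusion h6)
    | simp [h1, h2, h3, h4, h5, h6]

theorem pv_class_space (c : Char) : pvCharClass c = 2 ↔ PySem.Chars.isspace c = true := by
  unfold pvCharClass
  by_cases h1 : PySem.Chars.isalpha c <;>
  by_cases h2 : PySem.Chars.isdigit c <;>
  by_cases h3 : PySem.Chars.isspace c <;>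
  first
    | (rw [pv_alpha_not_digit c h1] at h2; exact Bool.noConfusion h2)
    | (rw [pv_alpha_not_space c h1] at h3; exact Bool.noConfusion h3)
    | (rw [pv_digit_not_space c h2] at h3; exact Bool.noConfusion h3)
    | simp [h1, h2, h3]

-- strip is the identity on a run with no space characters
theorem pv_dropWhile_no_space (l : List Char) (h : ∀ c ∈ l, PySem.Chars.isspace c = false) :
    l.dropWhile PySem.Chars.isspace = l := by
  cases l with
  | nil => rfl
  | cons a t => simp [List.dropWhile, h a (by simp)]

theorem pv_strip_no_space (l : List Char) (h : ∀ c ∈ l, PySem.Chars.isspace c = false) :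
    PySem.Chars.strip l = l := by
  unfold PySem.Chars.strip PySem.Chars.lstrip PySem.Chars.rstrip
  rw [pv_dropWhile_no_space l h,
      pv_dropWhile_no_space l.reverse (by intro c hc; exact h c (List.mem_reverse.mp hc)),
      List.reverse_reverse]

theorem pv_strip_all_space (l : List Char) (h : ∀ c ∈ l, PySem.Chars.isspace c = true) :
    PySem.Chars.strip l = [] := by
  unfold PySem.Chars.strip PySem.Chars.lstrip PySem.Chars.rstrip
  rw [List.dropWhile_eq_nil_iff.mpr h]
  rfl

-- run chars are non-space when the run's class is not 2
theorem pv_run_no_space (h : Char) (body : List Char)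
    (hb : ∀ c ∈ body, pvCharClass c = pvCharClass h) (h2 : pvCharClass h ≠ 2) :
    ∀ c ∈ h :: body, PySem.Chars.isspace c = false := by
  intro c hc
  rcases List.mem_cons.mp hc with hc | hc
  · subst hc
    rcases hsp : PySem.Chars.isspace c with _ | _
    · rfl
    · exact absurd ((pv_class_space c).mpr hsp) h2
  · rcases hsp : PySem.Chars.isspace c with _ | _
    · rfl
    · exact absurd ((hb c hc).symm.trans ((pv_class_space c).mpr hsp)) h2

-- emitting one homogeneous run equals Source B's treatment of that group
theorem pv_emit_eq_bstep (h : Char) (body : List Char) (toks : List (List Char))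
    (hb : ∀ c ∈ body, pvCharClass c = pvCharClass h) (h3 : pvCharClass h = 3 → body = []) :
    pvEmitTok (h :: body) toks = pvBStep toks (h :: body) := by
  unfold pvEmitTok pvBStep
  by_cases h2 : pvCharClass h = 2
  · rw [pv_strip_all_space (h :: body) (by
      intro c hc
      rcases List.mem_cons.mp hc with hc | hc
      · subst hc; exact (pv_class_space c).mp h2
      · exact (pv_class_space c).mp ((hb c hc).trans h2))]
    simp [h2]
  · rw [pv_strip_no_space _ (pv_run_no_space h body hb h2)]
    by_cases hcl3 : pvCharClass h = 3
    · rw [h3 hcl3]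
      simp [hcl3]
    · simp [h2, hcl3]

-- B side: pvScan equals Source B's fold over the groupby groups
theorem pv_scan_eq_groups (rest : List Char) : ∀ (h : Char) (body : List Char) (toks : List (List Char)),
    (∀ c ∈ body, pvCharClass c = pvCharClass h) → (pvCharClass h = 3 → body = []) →
    pvScan rest h body toks = (pvGroupBy (h :: (body ++ rest))).foldl pvBStep toks := by
  induction rest with
  | nil =>
    intro h body toks hb h3
    rw [pvGroupBy_cons]
    simp only [List.append_nil]
    rw [List.takeWhile_eq_self_iff.mpr (by intro c hc; simp [hb c hc]),
        List.dropWhile_eq_nil_iff.mpr (by intro c hc; simp [hb c hc]),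
        pvGroupBy_nil]
    simp only [List.foldl_cons, List.foldl_nil]
    rw [pvScan]
    exact pv_emit_eq_bstep h body toks hb h3
  | cons c rest' ih =>
    intro h body toks hb h3
    rw [pvScan]
    by_cases hsr : pvSameRun h c = true
    · obtain ⟨hcc, hc3⟩ := (pvSameRun_iff h c).mp hsr
      rw [if_pos hsr, ih h (body ++ [c]) toks
            (by intro d hd
                rcases List.mem_append.mp hd with hd | hd
                · exact hb d hd
                · simp at hd; subst hd; exact hcc)
            (fun he => absurd (hcc.trans he) hc3)]
      simp
    · rw [if_neg hsr]
      by_cases hcc : pvCharClass c = pvCharClass h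
      · -- both characters are of class 3: A emits h alone, Source B splits the joint group
        have hc3 : pvCharClass c = 3 := by
          by_contra hne
          exact hsr ((pvSameRun_iff h c).mpr ⟨hcc, hne⟩)
        have hh3 : pvCharClass h = 3 := hcc ▸ hc3
        have hbe : body = [] := h3 hh3
        subst hbe
        have hct : (fun d => pvCharClass d == pvCharClass h) c = true := by simp [hcc]
        rw [ih c [] (pvEmitTok [h] toks) (by simp) (fun _ => rfl)]
        simp only [List.nil_append]
        have hp : (fun d => pvCharClass d == pvCharClass c) = (fun d => pvCharClass d == pvCharClass h) := by
          funext d; rw [hcc]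
        rw [pvGroupBy_cons, hp]
        conv_rhs => rw [pvGroupBy_cons]
        rw [List.takeWhile_cons_of_pos (p := fun d => pvCharClass d == pvCharClass h) hct,
            List.dropWhile_cons_of_pos (p := fun d => pvCharClass d == pvCharClass h) hct]
        simp only [List.foldl_cons]
        congr 1
        rw [show pvEmitTok [h] toks = toks ++ [[h]] from by
              unfold pvEmitTok
              rw [pv_strip_no_space [h] (pv_run_no_space h [] (by simp) (by rw [hh3]; decide))]
              simp]
        unfold pvBStep
        simp [hh3, hc3]
      · -- class changes: emit the run, start a fresh one
        have hall : ∀ d ∈ body, (fun d => pvCharClass d == pvCharClass h) d = true := by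
          intro d hd; simp [hb d hd]
        have hcf : (fun d => pvCharClass d == pvCharClass h) c = false := by simp [hcc]
        rw [ih c [] (pvEmitTok (h :: body) toks) (by simp) (fun _ => rfl)]
        simp only [List.nil_append]
        conv_rhs => rw [pvGroupBy_cons]
        have htw : List.takeWhile (fun d => pvCharClass d == pvCharClass h) (body ++ c :: rest') = body := by
          rw [List.takeWhile_append]
          simp [List.takeWhile_eq_self_iff.mpr hall, List.takeWhile_cons, hcf]
        have hdw : List.dropWhile (fun d => pvCharClass d == pvCharClass h) (body ++ c :: rest') = c :: rest' := by
          rw [List.dropWhile_append]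
          simp [List.dropWhile_eq_nil_iff.mpr hall, List.dropWhile_cons, hcf]
        rw [htw, hdw]
        simp only [List.foldl_cons]
        rw [pv_emit_eq_bstep h body toks hb h3]

-- small indexing fact used for A's fold
theorem pv_getD_append (xs : List Char) (c : Char) (ys : List Char) (d : Char) :
    (xs ++ c :: ys).getD xs.length d = c := by
  induction xs with
  | nil => rfl
  | cons a t ih => simpa using ih

-- A side: the indexed fold plus the final emit equals pvScan
theorem pv_fold_eq_scan (rest : List Char) : ∀ (pre : List Char) (h : Char) (body : List Char) (toks : List (List Char)),
    pvAFinish (pre ++ h :: body ++ rest)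
      ((PySem.List.pyRange ((pre.length + body.length + 1 : Nat) : Int)
          (PySem.List.len (pre ++ h :: body ++ rest)) 1).foldl
        (pvAStep (pre ++ h :: body ++ rest)) (((pre.length : Nat) : Int), toks))
    = pvScan rest h body toks := by
  induction rest with
  | nil =>
    intro pre h body toks
    rw [PySem.List.pyRange_one_eq_nil (by simp; omega)]
    rw [pvScan, pvAFinish]
    simp only [List.foldl_nil]
    rw [PySem.List.slice_from_natCast]
    simp [pvEmitTok]
  | cons c rest' ih =>
    intro pre h body toks
    have hlt : ((pre.length + body.length + 1 : Nat) : Int) < PySem.List.len (pre ++ h :: body ++ c :: rest') := by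
      simp; push_cast; omega
    rw [PySem.List.pyRange_one_cons hlt]
    simp only [List.foldl_cons]
    have hci : PySem.List.pyGetD (pre ++ h :: body ++ c :: rest') ((pre.length + body.length + 1 : Nat) : Int) ' ' = c := by
      rw [PySem.List.pyGetD_natCast,
          show pre ++ h :: body ++ c :: rest' = (pre ++ h :: body) ++ c :: rest' by simp,
          show pre.length + body.length + 1 = (pre ++ h :: body).length by simp; omega,
          pv_getD_append]
    have hcs : PySem.List.pyGetD (pre ++ h :: body ++ c :: rest') ((pre.length : Nat) : Int) ' ' = h := by
      rw [PySem.List.pyGetD_natCast,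
          show pre ++ h :: body ++ c :: rest' = pre ++ h :: (body ++ c :: rest') by simp,
          pv_getD_append]
    have hslice : PySem.Chars.strip (PySem.List.slice (pre ++ h :: body ++ c :: rest')
        (some ((pre.length : Nat) : Int)) (some ((pre.length + body.length + 1 : Nat) : Int)))
        = PySem.Chars.strip (h :: body) := by
      rw [PySem.List.slice_natCast,
          show pre ++ h :: body ++ c :: rest' = pre ++ (h :: body ++ c :: rest') by simp,
          List.drop_left,
          show pre.length + body.length + 1 - pre.length = body.length + 1 by omega,
          show h :: body ++ c :: rest' = (h :: body) ++ c :: rest' by simp,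
          List.take_left' (by simp)]
    have hstep : pvAStep (pre ++ h :: body ++ c :: rest') (((pre.length : Nat) : Int), toks)
        ((pre.length + body.length + 1 : Nat) : Int)
        = if pvSameRun h c then (((pre.length : Nat) : Int), toks)
          else (((pre.length + body.length + 1 : Nat) : Int), pvEmitTok (h :: body) toks) := by
      unfold pvAStep
      simp only [hci, hcs, hslice]
      exact pv_branch h c _ _
    rw [hstep]
    by_cases hsr : pvSameRun h c = true
    · rw [if_pos hsr, pvScan, if_pos hsr,
          show pre ++ h :: body ++ c :: rest' = pre ++ h :: (body ++ [c]) ++ rest' by simp,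
          show ((pre.length + body.length + 1 : Nat) : Int) + 1
            = ((pre.length + (body ++ [c]).length + 1 : Nat) : Int) by simp; omega]
      exact ih pre h (body ++ [c]) toks
    · rw [if_neg hsr, pvScan, if_neg hsr,
          show pre ++ h :: body ++ c :: rest' = (pre ++ h :: body) ++ c :: [] ++ rest' by simp,
          show ((pre.length + body.length + 1 : Nat) : Int)
            = (((pre ++ h :: body).length : Nat) : Int) by simp; omega,
          show (((pre ++ h :: body).length : Nat) : Int) + 1
            = (((pre ++ h :: body).length + List.length ([] : List Char) + 1 : Nat) : Int) by simp]
      exact ih (pre ++ h :: body) c [] (pvEmitTok (h :: body) toks)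

-- ===== VERDICT (by name: the statement is the Claim_ definition above) =====
theorem tokenize_by_character_groups_spec : Claim_equal_tokenize_by_character_groups := by
  intro source_text _
  unfold Spec_tokenize_by_character_groups tokenize_by_character_groups tokenize_by_character_groups_alt
  rcases hs : source_text.toList with _ | ⟨c, t⟩
  · simp [pvGroupBy_nil, pvAFinish, PySem.Chars.strip, PySem.Chars.lstrip, PySem.Chars.rstrip]
  · show (pvAFinish (c :: t)
        ((PySem.List.pyRange 1 (PySem.List.len (c :: t)) 1).foldl (pvAStep (c :: t)) (0, []))).map String.ofList
      = ((pvGroupBy (c :: t)).foldl pvBStep []).map String.ofList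
    have hA := pv_fold_eq_scan t [] c [] []
    simp only [List.nil_append, List.cons_append, List.length_nil, Nat.zero_add, Nat.cast_one, Nat.cast_zero] at hA
    have hB := pv_scan_eq_groups t c [] [] (by simp) (fun _ => rfl)
    simp only [List.nil_append] at hB
    rw [hA, hB]
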